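-- pv_equiv track=rewrite | github.com/Adarshb2000/coding | SHROUTE.py | shroute
-- ===== SOURCE A (Python) =====
-- def one_extended(numbers: list):
--     answer = [-1]
--     curr = -1
--     for index, num in enumerate(numbers, start=1):
--         if num == 1:
--             curr = index
--
--         answer.append(curr)
--
--     return answer
--
-- def two_contracted(numbers: list):
--     answer = [-1] * (len(numbers) + 1)
--     curr = -1
--     for index in range(len(numbers) - 1, -1, -1):
--         if numbers[index] == 2:
--             curr = index + 1
--
--         answer[index + 1] = curr
--
--     return answer
--
-- def shroute(trains: list, peeps: list):
--     n = trains.__len__()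
--     m = peeps.__len__()
--     ones = one_extended(trains)
--     twos = two_contracted(trains)
--
--     answer = [0] * m
--     for index, peep in enumerate(peeps):
--         if peep == 1:
--             continue
--         if ones[peep] == twos[peep] == -1:
--             answer[index] = -1
--         elif ones[peep] == -1:
--             answer[index] = twos[peep] - peep
--         elif twos[peep] == -1:
--             answer[index] = peep - ones[peep]
--         else:
--             answer[index] = min(twos[peep] - peep, peep - ones[peep])
--
--     return answer
-- ===== SOURCE B (Python) =====
-- def bisect_ge(xs, x, lo, hi):
--     # first index t in [lo, hi] with xs[t] >= x (xs sorted ascending)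
--     if lo >= hi:
--         return lo
--     mid = (lo + hi) // 2
--     if xs[mid] < x:
--         return bisect_ge(xs, x, mid + 1, hi)
--     return bisect_ge(xs, x, lo, mid)
--
--
-- def shroute(trains: list, peeps: list):
--     # Event-position lists + per-query binary search instead of precomputed
--     # nearest-neighbour tables: collect the (1-based) positions of the 1s and
--     # of the 2s once, then answer each query by binary-searching those lists.
--     ones = [i for i, t in enumerate(trains, start=1) if t == 1]
--     twos = [i for i, t in enumerate(trains, start=1) if t == 2]
--     answer = []
--     for p in peeps:
--         if p == 1:
--             answer.append(0)
--             continue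
--         j = bisect_ge(ones, p + 1, 0, len(ones))   # ones[:j] are the 1s at or before p
--         k = bisect_ge(twos, p, 0, len(twos))       # twos[k:] are the 2s at or after p
--         if j == 0 and k == len(twos):
--             answer.append(-1)
--         elif j == 0:
--             answer.append(twos[k] - p)
--         elif k == len(twos):
--             answer.append(p - ones[j - 1])
--         else:
--             answer.append(min(p - ones[j - 1], twos[k] - p))
--     return answer
-- ===== Notes on version B (the rewrite author's own statement) =====
-- stated objective: alternative
-- what changed: B drops A's two precomputed forward/backward nearest-neighbour sweep tables entirely and instead collects the occurrence-position lists of the 1s and the 2s, answering each query with a hand-rolled binary search over those sorted lists.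
-- intended difference: On queries p <= 0 (Python's negative-index wraparound and the non-existent station 0) A reads its tables at the wrapped slot but mixes in the raw p, returning -1 or a meaningless negative/shifted distance whenever a 1 lies at-or-before (or a 2 strictly before) the wrapped slot, or a 2 exists when the slot is 0; B treats p as a plain coordinate and returns the true distance to the nearest 2 at-or-after it (or -1), which is the intended value. — e.g. on shroute([2], [0]): A returns [-1], B returns [1]
import Mathlib
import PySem

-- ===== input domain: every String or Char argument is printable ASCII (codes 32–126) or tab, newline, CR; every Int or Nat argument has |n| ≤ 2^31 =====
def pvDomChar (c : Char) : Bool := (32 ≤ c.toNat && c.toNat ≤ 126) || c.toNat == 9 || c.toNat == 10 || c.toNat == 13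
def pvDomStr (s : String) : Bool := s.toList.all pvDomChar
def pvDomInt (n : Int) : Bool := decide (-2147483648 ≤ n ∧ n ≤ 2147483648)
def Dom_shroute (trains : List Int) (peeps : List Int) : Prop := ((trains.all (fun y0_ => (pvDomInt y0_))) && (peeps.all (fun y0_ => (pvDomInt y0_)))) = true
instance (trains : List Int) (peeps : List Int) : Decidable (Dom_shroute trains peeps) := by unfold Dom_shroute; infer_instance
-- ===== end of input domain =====

-- B replaces A's two precomputed forward/backward nearest-neighbour sweep tables by the
-- occurrence-position lists of the 1s and of the 2s, answering each query with a
-- hand-rolled binary search over those sorted lists (objective: alternative).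

-- ===== PORT A =====
def one_extended (numbers : List Int) : List Int :=
  ((PySem.List.enumerate numbers 1).foldl
    (fun (st : List Int × Int) p =>
      let curr := if p.2 == 1 then p.1 else st.2
      (st.1 ++ [curr], curr))
    ([-1], -1)).1

def two_contracted (numbers : List Int) : List Int :=
  ((PySem.List.pyRange ((numbers.length : Int) - 1) (-1) (-1)).foldl
    (fun (st : List Int × Int) idx =>
      let curr := if PySem.List.pyGetD numbers idx 0 == 2 then idx + 1 else st.2
      (st.1.set (idx + 1).toNat curr, curr))
    (List.replicate (numbers.length + 1) (-1), -1)).1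

def shroute (trains : List Int) (peeps : List Int) : List Int :=
  let ones := one_extended trains
  let twos := two_contracted trains
  (PySem.List.enumerate peeps 0).foldl
    (fun (answer : List Int) p =>
      let index := p.1
      let peep := p.2
      if peep == 1 then answer
      else
        let o := PySem.List.pyGetD ones peep 0
        let t := PySem.List.pyGetD twos peep 0
        let v :=
          if o == t && t == -1 then -1
          else if o == -1 then t - peep
          else if t == -1 then peep - o
          else min (t - peep) (peep - o)
        answer.set index.toNat v)
    (List.replicate peeps.length 0)

-- ===== PORT B =====
-- recursive binary search of Source B; the Nat fuel only makes the recursion structural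
-- (it is always large enough: each step shrinks hi - lo)
def bisect_go (xs : List Int) (x : Int) : Nat → Int → Int → Int
  | 0, lo, _ => lo
  | fuel + 1, lo, hi =>
    if lo ≥ hi then lo
    else
      let mid := PySem.Int.floordiv (lo + hi) 2
      if PySem.List.pyGetD xs mid 0 < x then bisect_go xs x fuel (mid + 1) hi
      else bisect_go xs x fuel lo mid

def bisect_ge (xs : List Int) (x : Int) (lo hi : Int) : Int :=
  bisect_go xs x (hi - lo).toNat lo hi

def posOf (v : Int) (trains : List Int) : List Int :=
  ((PySem.List.enumerate trains 1).filter (fun q => q.2 == v)).map (fun q => q.1)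

def shroute_alt (trains : List Int) (peeps : List Int) : List Int :=
  let ones := posOf 1 trains
  let twos := posOf 2 trains
  peeps.foldl
    (fun (answer : List Int) p =>
      if p == 1 then answer ++ [0]
      else
        let j := bisect_ge ones (p + 1) 0 (ones.length : Int)
        let k := bisect_ge twos p 0 (twos.length : Int)
        if j == 0 && k == (twos.length : Int) then answer ++ [-1]
        else if j == 0 then answer ++ [PySem.List.pyGetD twos k 0 - p]
        else if k == (twos.length : Int) then answer ++ [p - PySem.List.pyGetD ones (j - 1) 0]
        else answer ++ [min (p - PySem.List.pyGetD ones (j - 1) 0) (PySem.List.pyGetD twos k 0 - p)])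
    []

-- ===== PRECONDITION & SPEC =====
-- Pre_ excludes exactly the inputs where A raises IndexError: a peep other than
-- the literal 1 lying outside Python's index range [-(n+1), n] of the tables.
def Pre_shroute (trains : List Int) (peeps : List Int) : Prop :=
  ∀ p ∈ peeps, p = 1 ∨ (-((trains.length : Int) + 1) ≤ p ∧ p ≤ (trains.length : Int))
instance (trains : List Int) (peeps : List Int) : Decidable (Pre_shroute trains peeps) := by
  unfold Pre_shroute; infer_instance

def pvWitness_shroute : List Int × List Int := ([1, 0, 2], [0, 1, 2, 3])

-- On queries p ≤ 0 (Python's negative-index wraparound and the non-existent station 0)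
-- A reads its tables at the wrapped slot but mixes in the raw p, returning -1 or a
-- meaningless negative/shifted distance whenever a 1 lies at-or-before (or a 2 strictly
-- before) the wrapped slot, or a 2 exists when the slot is 0; B treats p as a plain
-- coordinate and returns the true distance to the nearest 2 at-or-after it (or -1),
-- which is the intended value.
def dCond (trains : List Int) (p : Int) : Prop :=
  p ≤ 0 ∧ -((trains.length : Int) + 1) ≤ p ∧
    (let w : Nat := (if 0 ≤ p then p else p + trains.length + 1).toNat
     if w = 0 then (2 : Int) ∈ trains
     else ((1 : Int) ∈ trains.take w ∨ (2 : Int) ∈ trains.take (w - 1)))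

def D_shroute (trains : List Int) (peeps : List Int) : Prop :=
  ∃ p ∈ peeps, dCond trains p
instance (trains : List Int) (peeps : List Int) : Decidable (D_shroute trains peeps) := by
  unfold D_shroute dCond; infer_instance

def Spec_shroute (trains : List Int) (peeps : List Int) (out : List Int) : Prop :=
  ¬ D_shroute trains peeps → out = shroute_alt trains peeps
instance (trains : List Int) (peeps : List Int) (out : List Int) : Decidable (Spec_shroute trains peeps out) := by
  unfold Spec_shroute; infer_instance

def pvDiffWitness_shroute : List Int × List Int := ([2], [0])
def pvDiffWitnessOut_shroute : (List Int) × (List Int) := ([-1], [1])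

-- ===== CLAIM (what is proved, stated in full; the proofs are below) =====
def Claim_unchanged_shroute : Prop := ∀ (trains : List Int) (peeps : List Int), Dom_shroute trains peeps → Pre_shroute trains peeps → Spec_shroute trains peeps (shroute trains peeps)
def Claim_changed_shroute : Prop := Dom_shroute (pvDiffWitness_shroute.1) (pvDiffWitness_shroute.2) ∧ Pre_shroute (pvDiffWitness_shroute.1) (pvDiffWitness_shroute.2) ∧ D_shroute (pvDiffWitness_shroute.1) (pvDiffWitness_shroute.2) ∧ shroute (pvDiffWitness_shroute.1) (pvDiffWitness_shroute.2) = pvDiffWitnessOut_shroute.1 ∧ shroute_alt (pvDiffWitness_shroute.1) (pvDiffWitness_shroute.2) = pvDiffWitnessOut_shroute.2 ∧ pvDiffWitnessOut_shroute.1 ≠ pvDiffWitnessOut_shroute.2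
def Claim_exact_shroute : Prop := ∀ (trains : List Int) (peeps : List Int), Dom_shroute trains peeps → Pre_shroute trains peeps → D_shroute trains peeps → shroute trains peeps ≠ shroute_alt trains peeps

-- ===== LEMMAS AND PROOFS =====
-- ---- A-side characterisation: tables as running left/right nearest occurrences ----
def lposs (i curr : Int) : List Int → List Int
  | [] => []
  | x :: xs => let c := if x == 1 then i else curr; c :: lposs (i + 1) c xs

def lcur (i curr : Int) : List Int → Int
  | [] => curr
  | x :: xs => lcur (i + 1) (if x == 1 then i else curr) xs

def rposs (i curr : Int) : List Int → List Int × Int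
  | [] => ([], curr)
  | x :: xs =>
    let r := rposs (i + 1) curr xs
    let c := if x == 2 then i else r.2
    (c :: r.1, c)

theorem lposs_length (xs : List Int) : ∀ i c, (lposs i c xs).length = xs.length := by
  induction xs with
  | nil => simp [lposs]
  | cons x xs ih => intro i c; simp [lposs, ih]

theorem rposs_length (xs : List Int) : ∀ i c, ((rposs i c xs).1).length = xs.length := by
  induction xs with
  | nil => simp [rposs]
  | cons x xs ih => intro i c; simp [rposs, ih]

theorem one_ext_fold (xs : List Int) : ∀ (i : Int) (acc : List Int) (c : Int),
    ((PySem.List.enumerate xs i).foldl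
      (fun (st : List Int × Int) p =>
        let curr := if p.2 == 1 then p.1 else st.2
        (st.1 ++ [curr], curr)) (acc, c)).1 = acc ++ lposs i c xs := by
  induction xs with
  | nil => intro i acc c; simp [PySem.List.enumerate_nil, lposs]
  | cons x xs ih =>
    intro i acc c
    rw [PySem.List.enumerate_cons]
    simp only [List.foldl_cons]
    rw [ih]
    simp [lposs]

theorem lposs_get (xs : List Int) : ∀ (i c : Int) (j : Nat) (h : j < (lposs i c xs).length),
    (lposs i c xs)[j] = lcur i c (xs.take (j + 1)) := by
  induction xs with
  | nil => intro i c j h; simp [lposs] at h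
  | cons x xs ih =>
    intro i c j h
    cases j with
    | zero => simp [lposs, lcur]
    | succ j =>
      simp only [lposs, List.getElem_cons_succ, List.take_succ_cons, lcur]
      exact ih _ _ j (by simpa [lposs, lposs_length] using h)

theorem rposs_get (xs : List Int) : ∀ (i c : Int) (j : Nat) (h : j < ((rposs i c xs).1).length),
    (rposs i c xs).1[j] = (rposs (i + j) c (xs.drop j)).2 := by
  induction xs with
  | nil => intro i c j h; simp [rposs] at h
  | cons x xs ih =>
    intro i c j h
    cases j with
    | zero => simp [rposs]
    | succ j =>
      simp only [rposs, List.getElem_cons_succ, List.drop_succ_cons]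
      rw [show (i + ((j+1 : Nat) : Int)) = (i + 1) + (j : Int) by push_cast; ring]
      exact ih _ _ j (by simpa [rposs, rposs_length] using h)

theorem one_ext_eq (xs : List Int) : one_extended xs = -1 :: lposs 1 (-1) xs := by
  unfold one_extended
  rw [one_ext_fold]
  rfl

theorem rposs_snoc (ys : List Int) : ∀ (y : Int) (i curr : Int),
    rposs i curr (ys ++ [y]) =
      (((rposs i (if y == 2 then i + ys.length else curr) ys).1) ++ [if y == 2 then i + ys.length else curr],
        (rposs i (if y == 2 then i + ys.length else curr) ys).2) := by
  induction ys with
  | nil => intro y i curr; by_cases h : y == 2 <;> simp [rposs, h]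
  | cons z zs ih =>
    intro y i curr
    have hc : (if y == 2 then i + ((z :: zs).length : Int) else curr)
        = (if y == 2 then (i + 1) + (zs.length : Int) else curr) := by
      by_cases h : y == 2 <;> simp [h] <;> push_cast <;> ring
    simp only [List.cons_append, rposs]
    rw [ih, hc]

theorem set_append_len (pre : List Int) (x v : Int) (rest : List Int) :
    (pre ++ x :: rest).set pre.length v = pre ++ v :: rest := by
  induction pre with
  | nil => simp
  | cons p ps ih => simp [ih]

theorem tc_fold (nums : List Int) : ∀ (k : Nat), k ≤ nums.length → ∀ (ans : List Int) (curr : Int),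
    ans.length = nums.length + 1 →
    ((PySem.List.pyRange ((k : Int) - 1) (-1) (-1)).foldl
      (fun (st : List Int × Int) idx =>
        let c := if PySem.List.pyGetD nums idx 0 == 2 then idx + 1 else st.2
        (st.1.set (idx + 1).toNat c, c)) (ans, curr))
    = (ans.take 1 ++ (rposs 1 curr (nums.take k)).1 ++ ans.drop (k + 1),
       (rposs 1 curr (nums.take k)).2) := by
  intro k
  induction k with
  | zero =>
    intro _ ans curr _
    rw [show ((0 : Nat) : Int) - 1 = -1 by norm_num,
        PySem.List.pyRange_neg_one_eq_nil (by norm_num)]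
    simp only [List.foldl_nil, List.take_zero, rposs, List.append_nil,
      Nat.zero_add]
    rw [show List.take 1 ans ++ List.drop 1 ans = ans from List.take_append_drop 1 ans]
  | succ k ih =>
    intro hk ans curr hlen
    have hk' : k < nums.length := by omega
    have hkl : k + 1 < ans.length := by omega
    rw [show (((k+1 : Nat) : Int)) - 1 = (k : Int) by push_cast; ring,
        PySem.List.pyRange_neg_one_cons (by omega)]
    simp only [List.foldl_cons]
    have hget : PySem.List.pyGetD nums (k : Int) 0 = nums[k] := by
      rw [PySem.List.pyGetD_natCast]
      exact List.getD_eq_getElem _ _ hk'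
    have htn : ((k : Int) + 1).toNat = k + 1 := by omega
    set c' : Int := if nums[k] == 2 then (k : Int) + 1 else curr with hc'
    have hstep : ((ans.set ((k : Int) + 1).toNat (if PySem.List.pyGetD nums (k : Int) 0 == 2 then (k : Int) + 1 else curr),
        if PySem.List.pyGetD nums (k : Int) 0 == 2 then (k : Int) + 1 else curr) : List Int × Int)
        = (ans.set (k+1) c', c') := by
      rw [hget, htn]
    rw [hstep, ih (by omega) _ _ (by simpa using hlen)]
    have hsnoc : nums.take (k+1) = nums.take k ++ [nums[k]] :=
      List.take_succ_eq_append_getElem hk'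
    have hlen_take : (nums.take k).length = k := by simp [List.length_take]; omega
    have hcc : (if nums[k] == 2 then (1 : Int) + (nums.take k).length else curr) = c' := by
      rw [hlen_take, hc']
      by_cases h : nums[k] == 2 <;> simp [h] <;> ring
    rw [hsnoc, rposs_snoc, hcc]
    have hset : ans.set (k+1) c' = ans.take (k+1) ++ c' :: ans.drop (k+2) :=
      List.set_eq_take_cons_drop c' hkl
    have htake1 : (ans.set (k+1) c').take 1 = ans.take 1 := by
      rw [hset, List.take_append_of_le_length (by simp [List.length_take]; omega)]
      simp [List.take_take]
    have hlt : (ans.take (k+1)).length = k+1 := by simp [List.length_take]; omega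
    have hdrop : (ans.set (k+1) c').drop (k+1) = c' :: ans.drop (k+2) := by
      rw [hset, List.drop_left' hlt]
    rw [htake1, hdrop]
    simp

theorem two_contracted_eq (xs : List Int) : two_contracted xs = -1 :: (rposs 1 (-1) xs).1 := by
  unfold two_contracted
  rw [congrArg Prod.fst (tc_fold xs xs.length le_rfl (List.replicate (xs.length + 1) (-1)) (-1) (by simp))]
  simp [List.take_replicate, List.drop_replicate, List.take_of_length_le]

def oE (trains : List Int) (J : Nat) : Int := if J = 0 then -1 else lcur 1 (-1) (trains.take J)
def tE (trains : List Int) (J : Nat) : Int := if J = 0 then -1 else (rposs (J : Int) (-1) (trains.drop (J - 1))).2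

def branchA (o t p : Int) : Int :=
  if o == t && t == -1 then -1
  else if o == -1 then t - p
  else if t == -1 then p - o
  else min (t - p) (p - o)

def aVal (trains : List Int) (peep : Int) : Int :=
  let o := PySem.List.pyGetD (one_extended trains) peep 0
  let t := PySem.List.pyGetD (two_contracted trains) peep 0
  if o == t && t == -1 then -1
  else if o == -1 then t - peep
  else if t == -1 then peep - o
  else min (t - peep) (peep - o)

def qA (trains : List Int) (p : Int) : Int := if p == 1 then 0 else aVal trains p

theorem outer_fold (g : Int → Int) (ps : List Int) : ∀ (k : Nat) (pre : List Int), pre.length = k →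
    (PySem.List.enumerate ps (k : Int)).foldl
      (fun (answer : List Int) p =>
        if p.2 == 1 then answer
        else answer.set p.1.toNat (g p.2))
      (pre ++ List.replicate ps.length 0)
    = pre ++ ps.map (fun p => if p == 1 then 0 else g p) := by
  induction ps with
  | nil => intro k pre _; simp
  | cons p ps ih =>
    intro k pre hk
    rw [PySem.List.enumerate_cons]
    simp only [List.foldl_cons, List.length_cons, List.replicate_succ, List.map_cons]
    by_cases hp : p == 1
    · simp only [hp, if_true]
      have : pre ++ (0 : Int) :: List.replicate ps.length 0 = (pre ++ [0]) ++ List.replicate ps.length 0 := by simp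
      rw [this, show ((k : Int) + 1) = ((k + 1 : Nat) : Int) by push_cast; ring,
          ih (k+1) (pre ++ [0]) (by simp [hk])]
      simp
    · have hp' : (p == 1) = false := by simpa using hp
      simp only [hp', Bool.false_eq_true, if_false]
      have htn : ((k : Int)).toNat = pre.length := by omega
      rw [htn, set_append_len, show pre ++ (g p) :: List.replicate ps.length 0 = (pre ++ [g p]) ++ List.replicate ps.length 0 by simp,
          show ((k : Int) + 1) = ((k + 1 : Nat) : Int) by push_cast; ring,
          ih (k+1) (pre ++ [g p]) (by simp [hk])]
      simp

theorem shroute_eq_map (trains peeps : List Int) :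
    shroute trains peeps = peeps.map (qA trains) := by
  unfold shroute
  have h := outer_fold (aVal trains) peeps 0 [] rfl
  simp only [List.nil_append, Nat.cast_zero] at h
  exact h

theorem one_extended_length (xs : List Int) : (one_extended xs).length = xs.length + 1 := by
  rw [one_ext_eq]; simp [lposs_length]

theorem two_contracted_length (xs : List Int) : (two_contracted xs).length = xs.length + 1 := by
  rw [two_contracted_eq]; simp [rposs_length]

theorem ones_entry (trains : List Int) (J : Nat) (hJ : J ≤ trains.length) :
    (one_extended trains)[J]'(by rw [one_extended_length]; omega)
      = oE trains J := by
  simp only [one_ext_eq]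
  cases J with
  | zero => simp [oE]
  | succ j =>
    simp only [oE, List.getElem_cons_succ, Nat.succ_ne_zero, if_false]
    exact lposs_get trains 1 (-1) j (by rw [lposs_length]; omega)

theorem twos_entry (trains : List Int) (J : Nat) (hJ : J ≤ trains.length) :
    (two_contracted trains)[J]'(by rw [two_contracted_length]; omega)
      = tE trains J := by
  simp only [two_contracted_eq]
  cases J with
  | zero => simp [tE]
  | succ j =>
    simp only [tE, List.getElem_cons_succ, Nat.succ_ne_zero, if_false, Nat.add_sub_cancel]
    rw [rposs_get trains 1 (-1) j (by rw [rposs_length]; omega)]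
    congr 1
    push_cast; ring

theorem getD_pos (xs : List Int) (p : Int) (d : Int) (h0 : 0 ≤ p) (hL : p < xs.length) :
    PySem.List.pyGetD xs p d = xs[p.toNat]'(by omega) :=
  PySem.List.pyGetD_eq_getElem xs d h0 hL

theorem getD_neg2 (xs : List Int) (p d : Int) (J : Nat) (h1 : -(xs.length : Int) ≤ p)
    (h2 : p < 0) (hJ : (J : Int) = p + xs.length) :
    PySem.List.pyGetD xs p d = xs[J]'(by omega) := by
  have hk1 : 0 < (-p).toNat := by omega
  have hk2 : (-p).toNat ≤ xs.length := by omega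
  obtain ⟨k, rfl⟩ : ∃ k : Nat, p = -(k : Int) := ⟨(-p).toNat, by omega⟩
  rw [PySem.List.pyGetD_neg_natCast xs k d (by omega) (by omega)]
  congr 1
  omega

theorem aVal_eq_pos (trains : List Int) (p : Int) (h0 : 0 ≤ p) (h2 : p ≤ trains.length) :
    aVal trains p = branchA (oE trains p.toNat) (tE trains p.toNat) p := by
  have ho : PySem.List.pyGetD (one_extended trains) p 0 = oE trains p.toNat := by
    rw [getD_pos _ _ _ h0 (by rw [one_extended_length]; omega),
        ones_entry trains p.toNat (by omega)]
  have ht : PySem.List.pyGetD (two_contracted trains) p 0 = tE trains p.toNat := by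
    rw [getD_pos _ _ _ h0 (by rw [two_contracted_length]; omega),
        twos_entry trains p.toNat (by omega)]
  unfold aVal branchA
  rw [ho, ht]

theorem aVal_eq_neg (trains : List Int) (p : Int) (h1 : -((trains.length : Int) + 1) ≤ p) (h2 : p < 0) :
    aVal trains p = branchA (oE trains (p + trains.length + 1).toNat) (tE trains (p + trains.length + 1).toNat) p := by
  have ho : PySem.List.pyGetD (one_extended trains) p 0 = oE trains (p + trains.length + 1).toNat := by
    rw [getD_neg2 (one_extended trains) p 0 (p + trains.length + 1).toNat
          (by rw [one_extended_length]; push_cast; omega) h2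
          (by rw [one_extended_length]; push_cast; omega),
        ones_entry trains _ (by omega)]
  have ht : PySem.List.pyGetD (two_contracted trains) p 0 = tE trains (p + trains.length + 1).toNat := by
    rw [getD_neg2 (two_contracted trains) p 0 (p + trains.length + 1).toNat
          (by rw [two_contracted_length]; push_cast; omega) h2
          (by rw [two_contracted_length]; push_cast; omega),
        twos_entry trains _ (by omega)]
  unfold aVal branchA
  rw [ho, ht]

-- ---- B-side: position lists ----
def posL (v : Int) : Int → List Int → List Int
  | _, [] => []
  | i, x :: xs => (if x == v then [i] else []) ++ posL v (i + 1) xs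

theorem posOf_eq_aux (v : Int) (xs : List Int) : ∀ i,
    ((PySem.List.enumerate xs i).filter (fun q => q.2 == v)).map (fun q => q.1) = posL v i xs := by
  induction xs with
  | nil => intro i; simp [PySem.List.enumerate_nil, posL]
  | cons x xs ih =>
    intro i
    rw [PySem.List.enumerate_cons]
    by_cases h : x == v <;> simp [h, posL, ih]

theorem posOf_eq (v : Int) (xs : List Int) : posOf v xs = posL v 1 xs := by
  unfold posOf; exact posOf_eq_aux v xs 1

theorem lcur_posL (xs : List Int) : ∀ i c, lcur i c xs = (posL 1 i xs).getLastD c := by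
  induction xs with
  | nil => intro i c; simp [lcur, posL]
  | cons x xs ih =>
    intro i c
    simp only [lcur, posL]
    by_cases h : (x == 1) = true
    · simp only [h, if_true, List.singleton_append, ih, List.getLastD_cons]
    · simp only [h, Bool.false_eq_true, if_false, List.nil_append, ih]

theorem rposs_posL (xs : List Int) : ∀ i c, (rposs i c xs).2 = (posL 2 i xs).headD c := by
  induction xs with
  | nil => intro i c; simp [rposs, posL]
  | cons x xs ih =>
    intro i c
    by_cases h : x == 2 <;> simp [rposs, posL, h, ih]

theorem posL_append (v : Int) (xs : List Int) : ∀ (ys : List Int) (i : Int),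
    posL v i (xs ++ ys) = posL v i xs ++ posL v (i + xs.length) ys := by
  induction xs with
  | nil => intro ys i; simp [posL]
  | cons x xs ih =>
    intro ys i
    simp only [List.cons_append, posL, ih, List.length_cons]
    rw [show i + 1 + (xs.length : Int) = i + ((xs.length : Int) + 1) by ring]
    simp

theorem posL_mem (v : Int) (xs : List Int) : ∀ (i a : Int), a ∈ posL v i xs → i ≤ a ∧ a < i + xs.length := by
  induction xs with
  | nil => intro i a h; simp [posL] at h
  | cons x xs ih =>
    intro i a h
    simp only [posL, List.mem_append] at h
    rcases h with h | h
    · by_cases hx : (x == v) = true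
      · rw [if_pos hx] at h
        simp only [List.mem_singleton] at h
        subst h
        simp only [List.length_cons]
        push_cast
        omega
      · rw [if_neg hx] at h
        simp at h
    · have := ih (i + 1) a h
      simp only [List.length_cons]
      push_cast
      omega

theorem posL_sorted (v : Int) (xs : List Int) : ∀ i, (posL v i xs).Pairwise (· < ·) := by
  induction xs with
  | nil => intro i; simp [posL]
  | cons x xs ih =>
    intro i
    simp only [posL]
    by_cases hx : x == v
    · simp only [hx, if_true, List.singleton_append, List.pairwise_cons]
      exact ⟨fun a ha => by have := posL_mem v xs (i+1) a ha; omega, ih (i+1)⟩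
    · simp only [hx, Bool.false_eq_true, if_false, List.nil_append]
      exact ih (i+1)

theorem posL_nil_iff (v : Int) (xs : List Int) : ∀ i, (posL v i xs = [] ↔ v ∉ xs) := by
  induction xs with
  | nil => intro i; simp [posL]
  | cons x xs ih =>
    intro i
    simp only [posL, List.append_eq_nil_iff, List.mem_cons]
    by_cases hx : x == v
    · have : x = v := by simpa using hx
      simp [hx, this]
    · have : ¬ v = x := fun h => hx (by simp [h])
      simp [hx, ih (i+1), this]

theorem posL_take (v : Int) (trains : List Int) (J : Nat) (hJ : J ≤ trains.length) :
    (posL v 1 trains).filter (fun a => decide (a ≤ (J : Int))) = posL v 1 (trains.take J) := by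
  conv_lhs => rw [show trains = trains.take J ++ trains.drop J from (List.take_append_drop J trains).symm]
  rw [posL_append, List.filter_append]
  have h1 : (posL v 1 (trains.take J)).filter (fun a => decide (a ≤ (J : Int))) = posL v 1 (trains.take J) := by
    rw [List.filter_eq_self]
    intro a ha
    have := posL_mem v (trains.take J) 1 a ha
    simp [List.length_take] at this ⊢
    omega
  have h2 : (posL v (1 + (trains.take J).length) (trains.drop J)).filter (fun a => decide (a ≤ (J : Int))) = [] := by
    rw [List.filter_eq_nil_iff]
    intro a ha
    have := posL_mem v (trains.drop J) _ a ha
    simp [List.length_take] at this ⊢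
    omega
  rw [h1, h2, List.append_nil]

theorem posL_drop (v : Int) (trains : List Int) (J : Nat) (h1 : 1 ≤ J) (hJ : J ≤ trains.length) :
    (posL v 1 trains).filter (fun a => decide ((J : Int) ≤ a)) = posL v (J : Int) (trains.drop (J - 1)) := by
  conv_lhs => rw [show trains = trains.take (J-1) ++ trains.drop (J-1) from (List.take_append_drop (J-1) trains).symm]
  rw [posL_append, List.filter_append]
  have hlen : ((trains.take (J-1)).length : Int) = (J : Int) - 1 := by
    simp [List.length_take]; omega
  have h2 : (1 + ((trains.take (J-1)).length : Int)) = (J : Int) := by omega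
  have ha : (posL v 1 (trains.take (J-1))).filter (fun a => decide ((J : Int) ≤ a)) = [] := by
    rw [List.filter_eq_nil_iff]
    intro a hmem
    have := posL_mem v (trains.take (J-1)) 1 a hmem
    simp at this ⊢
    omega
  have hb : (posL v (1 + ((trains.take (J-1)).length : Int)) (trains.drop (J-1))).filter (fun a => decide ((J : Int) ≤ a))
      = posL v (1 + ((trains.take (J-1)).length : Int)) (trains.drop (J-1)) := by
    rw [List.filter_eq_self]
    intro a hmem
    have := posL_mem v (trains.drop (J-1)) _ a hmem
    simp at this ⊢
    omega
  rw [ha, hb, List.nil_append, h2]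

-- ---- B-side: binary-search correctness ----
theorem bisect_go_spec (xs : List Int) (x : Int) (hs : xs.Pairwise (· ≤ ·)) :
    ∀ (fuel : Nat) (lo hi : Int), 0 ≤ lo → lo ≤ hi → hi ≤ (xs.length : Int) → (hi - lo).toNat ≤ fuel →
    lo ≤ bisect_go xs x fuel lo hi ∧ bisect_go xs x fuel lo hi ≤ hi ∧
    (∀ i : Nat, lo ≤ (i : Int) → (i : Int) < bisect_go xs x fuel lo hi → xs.getD i 0 < x) ∧
    (∀ i : Nat, bisect_go xs x fuel lo hi ≤ (i : Int) → (i : Int) < hi → x ≤ xs.getD i 0) := by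
  have hmono : ∀ (a b : Nat), a ≤ b → (hb : b < xs.length) → xs.getD a 0 ≤ xs.getD b 0 := by
    intro a b hab hb
    rcases Nat.eq_or_lt_of_le hab with rfl | hlt
    · exact le_refl _
    · rw [List.getD_eq_getElem _ _ (by omega), List.getD_eq_getElem _ _ hb]
      exact List.pairwise_iff_getElem.mp hs a b (by omega) hb hlt
  intro fuel
  induction fuel with
  | zero =>
    intro lo hi h0 hlh hhl hf
    have : hi = lo := by omega
    subst this
    simp only [bisect_go]
    exact ⟨le_refl _, le_refl _, fun i h1 h2 => absurd (lt_of_le_of_lt h1 h2) (lt_irrefl _),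
      fun i h1 h2 => absurd (lt_of_le_of_lt h1 h2) (lt_irrefl _)⟩
  | succ fuel ih =>
    intro lo hi h0 hlh hhl hf
    simp only [bisect_go]
    by_cases hge : lo ≥ hi
    · simp only [hge, if_true]
      have : hi = lo := by omega
      subst this
      exact ⟨le_refl _, le_refl _, fun i h1 h2 => by omega, fun i h1 h2 => by omega⟩
    · simp only [hge, if_false]
      have hlt : lo < hi := by omega
      set mid := PySem.Int.floordiv (lo + hi) 2 with hmid
      have hmlo : lo ≤ mid := by
        rw [hmid, PySem.Int.le_floordiv_iff_mul_le (by norm_num)]; omega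
      have hmhi : mid < hi := by
        rw [hmid, PySem.Int.floordiv_lt_iff_lt_mul (by norm_num)]; omega
      have hmget : PySem.List.pyGetD xs mid 0 = xs.getD mid.toNat 0 := by
        rw [getD_pos xs mid 0 (by omega) (by omega), List.getD_eq_getElem _ _ (by omega)]
      by_cases hcmp : PySem.List.pyGetD xs mid 0 < x
      · simp only [hcmp, if_true]
        obtain ⟨g1, g2, g3, g4⟩ := ih (mid + 1) hi (by omega) (by omega) hhl (by omega)
        refine ⟨by omega, g2, ?_, g4⟩
        intro i hi1 hi2
        by_cases hle : (i : Int) ≤ mid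
        · calc xs.getD i 0 ≤ xs.getD mid.toNat 0 := hmono i mid.toNat (by omega) (by omega)
            _ < x := by rw [← hmget]; exact hcmp
        · exact g3 i (by omega) hi2
      · simp only [hcmp, if_false]
        obtain ⟨g1, g2, g3, g4⟩ := ih lo mid h0 (by omega) (by omega) (by omega)
        refine ⟨g1, by omega, g3, ?_⟩
        intro i hi1 hi2
        by_cases hle : mid ≤ (i : Int)
        · calc x ≤ xs.getD mid.toNat 0 := by rw [← hmget]; omega
            _ ≤ xs.getD i 0 := hmono mid.toNat i (by omega) (by omega)
        · exact g4 i hi1 (by omega)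

theorem filter_take_of (P : Int → Bool) : ∀ (xs : List Int) (t : Nat), t ≤ xs.length →
    (∀ (i : Nat) (h : i < xs.length), i < t → P xs[i]) →
    (∀ (i : Nat) (h : i < xs.length), t ≤ i → ¬ P xs[i]) →
    xs.filter P = xs.take t := by
  intro xs
  induction xs with
  | nil => intro t _ _ _; simp
  | cons x xs ih =>
    intro t ht hin hout
    cases t with
    | zero =>
      simp only [List.take_zero]
      rw [List.filter_eq_nil_iff]
      intro a ha
      obtain ⟨i, hi, rfl⟩ := List.mem_iff_getElem.mp ha
      exact hout i hi (by omega)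
    | succ t =>
      have hx : P x := hin 0 (by simp) (by omega)
      simp only [List.take_succ_cons, List.filter_cons, hx, if_true]
      rw [ih t (by simpa using ht)
        (fun i h hlt => hin (i+1) (by simpa using Nat.succ_lt_succ h) (by omega))
        (fun i h hge => hout (i+1) (by simpa using Nat.succ_lt_succ h) (by omega))]

theorem filter_drop_of (P : Int → Bool) : ∀ (xs : List Int) (t : Nat), t ≤ xs.length →
    (∀ (i : Nat) (h : i < xs.length), i < t → ¬ P xs[i]) →
    (∀ (i : Nat) (h : i < xs.length), t ≤ i → P xs[i]) →
    xs.filter P = xs.drop t := by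
  intro xs
  induction xs with
  | nil => intro t _ _ _; simp
  | cons x xs ih =>
    intro t ht hout hin
    cases t with
    | zero =>
      simp only [List.drop_zero]
      rw [List.filter_eq_self]
      intro a ha
      obtain ⟨i, hi, rfl⟩ := List.mem_iff_getElem.mp ha
      exact hin i hi (by omega)
    | succ t =>
      have hx : ¬ P x = true := hout 0 (by simp) (by omega)
      simp only [List.drop_succ_cons, List.filter_cons, if_neg hx]
      rw [ih t (by simpa using ht)
        (fun i h hlt => hout (i+1) (by simpa using Nat.succ_lt_succ h) (by omega))
        (fun i h hge => hin (i+1) (by simpa using Nat.succ_lt_succ h) (by omega))]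

theorem bisect_filter (xs : List Int) (hs : xs.Pairwise (· < ·)) (x : Int) :
    ∃ t : Nat, bisect_ge xs x 0 (xs.length : Int) = (t : Int) ∧ t ≤ xs.length ∧
      xs.filter (fun a => decide (a < x)) = xs.take t ∧
      xs.filter (fun a => decide (x ≤ a)) = xs.drop t := by
  have hs' : xs.Pairwise (· ≤ ·) := hs.imp (fun h => le_of_lt h)
  obtain ⟨g1, g2, g3, g4⟩ := bisect_go_spec xs x hs' ((xs.length : Int) - 0).toNat 0 (xs.length : Int)
    (by omega) (by omega) (le_refl _) (le_refl _)
  refine ⟨(bisect_ge xs x 0 (xs.length : Int)).toNat, by unfold bisect_ge; omega, by unfold bisect_ge at *; omega, ?_, ?_⟩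
  · apply filter_take_of
    · unfold bisect_ge at *; omega
    · intro i h hlt
      have := g3 i (by omega) (by unfold bisect_ge at *; omega)
      rw [List.getD_eq_getElem _ _ h] at this
      simpa using this
    · intro i h hge
      have := g4 i (by unfold bisect_ge at *; omega) (by omega)
      rw [List.getD_eq_getElem _ _ h] at this
      simp; omega
  · apply filter_drop_of
    · unfold bisect_ge at *; omega
    · intro i h hlt
      have := g3 i (by omega) (by unfold bisect_ge at *; omega)
      rw [List.getD_eq_getElem _ _ h] at this
      simp; omega
    · intro i h hge
      have := g4 i (by unfold bisect_ge at *; omega) (by omega)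
      rw [List.getD_eq_getElem _ _ h] at this
      simpa using this

-- ---- B as a per-query map ----
def qB (trains : List Int) (p : Int) : Int :=
  if p == 1 then 0
  else
    let ones := posOf 1 trains
    let twos := posOf 2 trains
    let j := bisect_ge ones (p + 1) 0 (ones.length : Int)
    let k := bisect_ge twos p 0 (twos.length : Int)
    if j == 0 && k == (twos.length : Int) then -1
    else if j == 0 then PySem.List.pyGetD twos k 0 - p
    else if k == (twos.length : Int) then p - PySem.List.pyGetD ones (j - 1) 0
    else min (p - PySem.List.pyGetD ones (j - 1) 0) (PySem.List.pyGetD twos k 0 - p)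

theorem shroute_alt_eq_map (trains peeps : List Int) :
    shroute_alt trains peeps = peeps.map (qB trains) := by
  unfold shroute_alt
  have hbody : (fun (answer : List Int) (p : Int) =>
      if p == 1 then answer ++ [0]
      else
        let j := bisect_ge (posOf 1 trains) (p + 1) 0 ((posOf 1 trains).length : Int)
        let k := bisect_ge (posOf 2 trains) p 0 ((posOf 2 trains).length : Int)
        if j == 0 && k == ((posOf 2 trains).length : Int) then answer ++ [-1]
        else if j == 0 then answer ++ [PySem.List.pyGetD (posOf 2 trains) k 0 - p]
        else if k == ((posOf 2 trains).length : Int) then answer ++ [p - PySem.List.pyGetD (posOf 1 trains) (j - 1) 0]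
        else answer ++ [min (p - PySem.List.pyGetD (posOf 1 trains) (j - 1) 0) (PySem.List.pyGetD (posOf 2 trains) k 0 - p)])
      = (fun (answer : List Int) (p : Int) => answer ++ [qB trains p]) := by
    funext answer p
    unfold qB
    dsimp only
    split_ifs <;> rfl
  exact Eq.trans (congrArg (fun f => List.foldl f ([] : List Int) peeps) hbody)
    (by
      show List.foldl (fun (answer : List Int) (p : Int) => answer ++ [qB trains p]) [] peeps
          = List.map (qB trains) peeps
      rw [PySem.List.foldl_append_singleton_eq_map]
      simp)

-- relate getLast?/head? of take/drop prefixes to indexing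
theorem getLast?_take_of (xs : List Int) (t : Nat) (h0 : 0 < t) (h : t ≤ xs.length) :
    (xs.take t).getLast? = some (xs[t-1]'(by omega)) := by
  rw [List.getLast?_eq_getElem?]
  have hlen : (xs.take t).length = t := by simp; omega
  rw [hlen, List.getElem?_take, if_pos (by omega), List.getElem?_eq_getElem (by omega)]

-- qB in terms of the filtered position lists
theorem qB_char (trains : List Int) (p : Int) (hp : ¬ (p == 1) = true) :
    qB trains p =
      (match ((posL 1 1 trains).filter (fun a => decide (a ≤ p))).getLast?,
             ((posL 2 1 trains).filter (fun a => decide (p ≤ a))).head? with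
       | none, none => -1
       | none, some f => f - p
       | some l, none => p - l
       | some l, some f => min (p - l) (f - p)) := by
  unfold qB
  simp only [hp, Bool.false_eq_true, if_false]
  rw [posOf_eq, posOf_eq]
  set P1 := posL 1 1 trains with hP1
  set P2 := posL 2 1 trains with hP2
  obtain ⟨t1, he1, ht1, hf1, -⟩ := bisect_filter P1 (posL_sorted 1 trains 1) (p + 1)
  obtain ⟨t2, he2, ht2, -, hd2⟩ := bisect_filter P2 (posL_sorted 2 trains 1) p
  have hfilter1 : P1.filter (fun a => decide (a ≤ p)) = P1.take t1 := by
    rw [← hf1]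
    apply List.filter_congr
    intro a _
    simp
  rw [hfilter1, hd2, he1, he2]
  by_cases h1 : t1 = 0 <;> by_cases h2 : t2 = P2.length
  · subst h1; subst h2
    simp [List.drop_length]
  · subst h1
    have ht2' : t2 < P2.length := by omega
    have hk : PySem.List.pyGetD P2 (t2 : Int) 0 = P2[t2]'ht2' := by
      rw [getD_pos P2 (t2 : Int) 0 (by omega) (by exact_mod_cast ht2')]
      exact getElem_congr rfl (by omega) (by omega)
    have hh : (P2.drop t2).head? = some (P2[t2]'ht2') := by
      rw [List.head?_drop, List.getElem?_eq_getElem ht2']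
    have hne : ((t2 : Int) == (P2.length : Int)) = false := by simp; omega
    simp [hne, hk, hh]
  · subst h2
    have ht1' : 0 < t1 := by omega
    have hgl := getLast?_take_of P1 t1 ht1' ht1
    have hj : PySem.List.pyGetD P1 ((t1 : Int) - 1) 0 = P1[t1-1]'(by omega) := by
      rw [getD_pos P1 ((t1 : Int) - 1) 0 (by omega) (by push_cast; omega)]
      exact getElem_congr rfl (by omega) (by omega)
    have hne : ((t1 : Int) == 0) = false := by simp; omega
    simp [hne, hgl, hj, List.drop_length]
  · have ht1' : 0 < t1 := by omega
    have ht2' : t2 < P2.length := by omega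
    have hgl := getLast?_take_of P1 t1 ht1' ht1
    have hj : PySem.List.pyGetD P1 ((t1 : Int) - 1) 0 = P1[t1-1]'(by omega) := by
      rw [getD_pos P1 ((t1 : Int) - 1) 0 (by omega) (by push_cast; omega)]
      exact getElem_congr rfl (by omega) (by omega)
    have hk : PySem.List.pyGetD P2 (t2 : Int) 0 = P2[t2]'ht2' := by
      rw [getD_pos P2 (t2 : Int) 0 (by omega) (by exact_mod_cast ht2')]
      exact getElem_congr rfl (by omega) (by omega)
    have hh : (P2.drop t2).head? = some (P2[t2]'ht2') := by
      rw [List.head?_drop, List.getElem?_eq_getElem ht2']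
    have hne1 : ((t1 : Int) == 0) = false := by simp; omega
    have hne2 : ((t2 : Int) == (P2.length : Int)) = false := by simp; omega
    simp [hne1, hne2, hgl, hj, hk, hh]

-- ---- A-side query values through the position lists ----
theorem oE_char (trains : List Int) (J : Nat) (hJ : J ≤ trains.length) :
    oE trains J = ((posL 1 1 trains).filter (fun a => decide (a ≤ (J : Int)))).getLastD (-1) := by
  rw [posL_take 1 trains J hJ]
  cases J with
  | zero => simp [oE, posL]
  | succ j =>
    simp only [oE, Nat.succ_ne_zero, if_false]
    exact lcur_posL (trains.take (j+1)) 1 (-1)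

theorem tE_char (trains : List Int) (J : Nat) (h1 : 1 ≤ J) (hJ : J ≤ trains.length) :
    tE trains J = ((posL 2 1 trains).filter (fun a => decide ((J : Int) ≤ a))).headD (-1) := by
  rw [posL_drop 2 trains J h1 hJ]
  rw [tE, if_neg (by omega : ¬ J = 0)]
  exact rposs_posL (trains.drop (J-1)) (J : Int) (-1)

theorem head_min (xs : List Int) (hs : xs.Pairwise (· < ·)) (f : Int) (hf : xs.head? = some f) :
    ∀ a ∈ xs, f ≤ a := by
  cases xs with
  | nil => simp at hf
  | cons y ys =>
    obtain rfl : y = f := by simpa using hf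
    intro a ha
    rcases List.mem_cons.mp ha with rfl | ha
    · exact le_refl a
    · exact le_of_lt ((List.pairwise_cons.mp hs).1 a ha)

-- the per-element form of D_shroute, restated without the let binder
theorem dCond_iff (trains : List Int) (p : Int) :
    dCond trains p ↔ (p ≤ 0 ∧ -((trains.length : Int) + 1) ≤ p ∧
      (((if 0 ≤ p then p else p + trains.length + 1).toNat = 0 → (2 : Int) ∈ trains) ∧
       ((if 0 ≤ p then p else p + trains.length + 1).toNat ≠ 0 →
         ((1 : Int) ∈ trains.take (if 0 ≤ p then p else p + trains.length + 1).toNat ∨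
          (2 : Int) ∈ trains.take ((if 0 ≤ p then p else p + trains.length + 1).toNat - 1))))) := by
  unfold dCond
  set w : Nat := (if 0 ≤ p then p else p + trains.length + 1).toNat
  by_cases hw : w = 0 <;> simp [hw]

-- B-side query value for non-positive stations: no 1 lies at-or-before, every 2 is at-or-after
theorem b_nonpos (trains : List Int) (p : Int) (hp : p ≤ 0) :
    ((posL 1 1 trains).filter (fun a => decide (a ≤ p)) = [] ∧
     (posL 2 1 trains).filter (fun a => decide (p ≤ a)) = posL 2 1 trains) := by
  constructor
  · rw [List.filter_eq_nil_iff]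
    intro a ha
    have := posL_mem 1 trains 1 a ha
    simp; omega
  · rw [List.filter_eq_self]
    intro a ha
    have := posL_mem 2 trains 1 a ha
    simp; omega

theorem q_eq (trains : List Int) (p : Int)
    (hrange : p = 1 ∨ (-((trains.length : Int) + 1) ≤ p ∧ p ≤ (trains.length : Int)))
    (hnd : ¬ dCond trains p) : qA trains p = qB trains p := by
  by_cases hp1 : (p == 1) = true
  · unfold qA qB; simp [hp1]
  · have hr : -((trains.length : Int) + 1) ≤ p ∧ p ≤ (trains.length : Int) := by
      rcases hrange with h | h
      · exact absurd (by simp [h]) hp1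
      · exact h
    rw [qB_char trains p hp1]
    unfold qA
    simp only [hp1, Bool.false_eq_true, if_false]
    by_cases hpos : 1 ≤ p
    · -- genuine station: both sides are nearest-1-at-or-before / nearest-2-at-or-after p
      have hJp : ((p.toNat : Nat) : Int) = p := by omega
      rw [aVal_eq_pos trains p (by omega) hr.2,
          oE_char trains p.toNat (by omega), tE_char trains p.toNat (by omega) (by omega), hJp]
      set L := (posL 1 1 trains).filter (fun a => decide (a ≤ p)) with hL
      set R := (posL 2 1 trains).filter (fun a => decide (p ≤ a)) with hR
      rw [List.getLastD_eq_getLast?, List.headD_eq_head?]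
      cases hLl : L.getLast? with
      | none =>
        cases hRh : R.head? with
        | none => simp [branchA]
        | some f =>
          have hf1 : 1 ≤ f := by
            have := posL_mem 2 trains 1 f (List.mem_of_mem_filter (List.mem_of_mem_head? hRh))
            omega
          have hfne : (f == (-1 : Int)) = false := by simp; omega
          simp [branchA, hfne]
      | some l =>
        have hl1 : 1 ≤ l := by
          have := posL_mem 1 trains 1 l (List.mem_of_mem_filter (List.mem_of_getLast? hLl))
          omega
        have hlne : (l == (-1 : Int)) = false := by simp; omega
        cases hRh : R.head? with
        | none => simp [branchA, hlne]
        | some f =>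
          have hf1 : 1 ≤ f := by
            have := posL_mem 2 trains 1 f (List.mem_of_mem_filter (List.mem_of_mem_head? hRh))
            omega
          have hfne : (f == (-1 : Int)) = false := by simp; omega
          simp only [Option.getD_some, branchA, hfne, hlne, Bool.and_false,
            Bool.false_eq_true, if_false]
          exact min_comm _ _
    · -- p ≤ 0: outside the stations
      have hp0 : p ≤ 0 := by omega
      obtain ⟨hLnil, hRall⟩ := b_nonpos trains p hp0
      rw [hLnil, hRall, List.getLast?_nil]
      by_cases hpz : p = 0
      · -- station 0
        subst hpz
        have h2no : (2 : Int) ∉ trains := by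
          intro hmem
          exact hnd ((dCond_iff trains 0).mpr ⟨le_refl 0, by omega, fun _ => hmem, by simp⟩)
        rw [(posL_nil_iff 2 trains 1).mpr h2no]
        rw [aVal_eq_pos trains 0 (by omega) (by omega)]
        simp [oE, tE, branchA]
      · have hneg : p < 0 := by omega
        rw [aVal_eq_neg trains p hr.1 hneg]
        set w : Nat := (p + trains.length + 1).toNat with hwdef
        have hwif : (if 0 ≤ p then p else p + trains.length + 1).toNat = w := by
          rw [if_neg (by omega)]
        have hwle : w ≤ trains.length := by omega
        by_cases hw0 : w = 0
        · have h2no : (2 : Int) ∉ trains := by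
            intro hmem
            exact hnd ((dCond_iff trains p).mpr ⟨hp0, hr.1, by rw [hwif]; exact ⟨fun _ => hmem, fun h => absurd hw0 h⟩⟩)
          rw [(posL_nil_iff 2 trains 1).mpr h2no, hw0]
          simp [oE, tE, branchA]
        · have hnmem : ¬((1 : Int) ∈ trains.take w ∨ (2 : Int) ∈ trains.take (w - 1)) := by
            intro hmem
            exact hnd ((dCond_iff trains p).mpr ⟨hp0, hr.1, by rw [hwif]; exact ⟨fun h => absurd h hw0, fun _ => hmem⟩⟩)
          have h1no : (1 : Int) ∉ trains.take w := fun h => hnmem (Or.inl h)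
          have h2no : (2 : Int) ∉ trains.take (w - 1) := fun h => hnmem (Or.inr h)
          have hoE : oE trains w = -1 := by
            rw [oE_char trains w hwle, posL_take 1 trains w hwle,
                (posL_nil_iff 1 (trains.take w) 1).mpr h1no]
            rfl
          have htE : tE trains w = (posL 2 (w : Int) (trains.drop (w - 1))).headD (-1) := by
            rw [tE_char trains w (by omega) hwle, posL_drop 2 trains w (by omega) hwle]
          have hP2 : posL 2 1 trains = posL 2 (w : Int) (trains.drop (w - 1)) := by
            conv_lhs => rw [show trains = trains.take (w-1) ++ trains.drop (w-1) from (List.take_append_drop _ _).symm]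
            rw [posL_append, (posL_nil_iff 2 (trains.take (w-1)) 1).mpr h2no, List.nil_append]
            congr 1
            simp [List.length_take]
            omega
          rw [hoE, htE, hP2]
          set X := posL 2 (w : Int) (trains.drop (w - 1)) with hX
          rw [List.headD_eq_head?]
          cases hXh : X.head? with
          | none => simp [branchA]
          | some g =>
            have hg : (w : Int) ≤ g := by
              have := posL_mem 2 (trains.drop (w-1)) (w : Int) g (List.mem_of_mem_head? hXh)
              omega
            have hgne : (g == (-1 : Int)) = false := by simp; omega
            simp [branchA, hgne]

theorem q_ne (trains : List Int) (p : Int) (hd : dCond trains p) :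
    qA trains p ≠ qB trains p := by
  obtain ⟨hp0, hlo, hin⟩ := (dCond_iff trains p).mp hd
  have hp1 : ¬ (p == 1) = true := by simp; omega
  have hlen : p ≤ (trains.length : Int) := by
    have : (0 : Int) ≤ trains.length := by positivity
    omega
  rw [qB_char trains p hp1]
  unfold qA
  simp only [hp1, Bool.false_eq_true, if_false]
  obtain ⟨hLnil, hRall⟩ := b_nonpos trains p hp0
  rw [hLnil, hRall, List.getLast?_nil]
  by_cases hpz : p = 0
  · subst hpz
    have h2mem : (2 : Int) ∈ trains := hin.1 (by simp)
    have hne : posL 2 1 trains ≠ [] := fun h => ((posL_nil_iff 2 trains 1).mp h) h2mem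
    rw [aVal_eq_pos trains 0 (by omega) (by omega)]
    cases hh : (posL 2 1 trains).head? with
    | none => exact absurd (List.head?_eq_none_iff.mp hh) hne
    | some f =>
      have hf1 : 1 ≤ f := by
        have := posL_mem 2 trains 1 f (List.mem_of_mem_head? hh)
        omega
      show branchA (oE trains ((0:Int).toNat)) (tE trains ((0:Int).toNat)) 0 ≠ f - 0
      have hval : branchA (oE trains ((0:Int).toNat)) (tE trains ((0:Int).toNat)) 0 = -1 := by
        simp [oE, tE, branchA]
      rw [hval]
      omega
  · have hneg : p < 0 := by omega
    rw [aVal_eq_neg trains p hlo hneg]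
    set w : Nat := (p + trains.length + 1).toNat with hwdef
    have hwif : (if 0 ≤ p then p else p + trains.length + 1).toNat = w := by
      rw [if_neg (by omega)]
    rw [hwif] at hin
    have hwle : w ≤ trains.length := by omega
    by_cases hw0 : w = 0
    · have h2mem : (2 : Int) ∈ trains := hin.1 hw0
      have hne : posL 2 1 trains ≠ [] := fun h => ((posL_nil_iff 2 trains 1).mp h) h2mem
      cases hh : (posL 2 1 trains).head? with
      | none => exact absurd (List.head?_eq_none_iff.mp hh) hne
      | some f =>
        have hf1 : 1 ≤ f := by
          have := posL_mem 2 trains 1 f (List.mem_of_mem_head? hh)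
          omega
        rw [hw0]
        show branchA (oE trains 0) (tE trains 0) p ≠ f - p
        have hval : branchA (oE trains 0) (tE trains 0) p = -1 := by simp [oE, tE, branchA]
        rw [hval]
        omega
    · have hmem := hin.2 hw0
      have htE' : tE trains w = ((posL 2 1 trains).filter (fun a => decide ((w : Int) ≤ a))).headD (-1) :=
        tE_char trains w (by omega) hwle
      by_cases h1m : (1 : Int) ∈ trains.take w
      · -- a 1 lies at-or-before the wrapped slot: A's value is negative, B's is -1 or positive
        have hone : posL 1 1 (trains.take w) ≠ [] :=
          fun h => ((posL_nil_iff 1 (trains.take w) 1).mp h) h1m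
        have hoE' : oE trains w = ((posL 1 1 trains).filter (fun a => decide (a ≤ (w : Int)))).getLastD (-1) :=
          oE_char trains w hwle
        rw [posL_take 1 trains w hwle] at hoE'
        cases hgl : (posL 1 1 (trains.take w)).getLast? with
        | none => exact absurd (List.getLast?_eq_none_iff.mp hgl) hone
        | some l =>
          have hl1 : 1 ≤ l := by
            have := posL_mem 1 (trains.take w) 1 l (List.mem_of_getLast? hgl)
            omega
          rw [List.getLastD_eq_getLast?, hgl] at hoE'
          simp only [Option.getD_some] at hoE'
          have hlne : (l == (-1 : Int)) = false := by simp; omega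
          have hqa : ∃ qa : Int, branchA l (tE trains w) p = qa ∧ qa ≤ p - l := by
            unfold branchA
            by_cases ht : tE trains w = -1
            · have hb1 : (l == tE trains w) = false := by simp [ht]; omega
              refine ⟨p - l, ?_, le_refl _⟩
              simp [ht, hlne]
            · have hb1 : (tE trains w == (-1 : Int)) = false := by simp [ht]
              refine ⟨min (tE trains w - p) (p - l), ?_, min_le_right _ _⟩
              simp [hb1, hlne]
          obtain ⟨qa, hqa1, hqa2⟩ := hqa
          cases hh : (posL 2 1 trains).head? with
          | none =>
            show branchA (oE trains w) (tE trains w) p ≠ -1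
            rw [hoE', hqa1]
            omega
          | some f =>
            have hf1 : 1 ≤ f := by
              have := posL_mem 2 trains 1 f (List.mem_of_mem_head? hh)
              omega
            show branchA (oE trains w) (tE trains w) p ≠ f - p
            rw [hoE', hqa1]
            omega
      · have h2m : (2 : Int) ∈ trains.take (w - 1) := by tauto
        have h2mem : (2 : Int) ∈ trains := List.mem_of_mem_take h2m
        have hne : posL 2 1 trains ≠ [] := fun h => ((posL_nil_iff 2 trains 1).mp h) h2mem
        have hoE : oE trains w = -1 := by
          rw [oE_char trains w hwle, posL_take 1 trains w hwle,
              (posL_nil_iff 1 (trains.take w) 1).mpr h1m]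
          rfl
        -- some 2-position lies at or before w-1
        have hsmall : ∃ a ∈ posL 2 1 trains, a ≤ (w : Int) - 1 := by
          have hfil : (posL 2 1 trains).filter (fun a => decide (a ≤ ((w - 1 : Nat) : Int))) = posL 2 1 (trains.take (w-1)) :=
            posL_take 2 trains (w-1) (by omega)
          have hnn : posL 2 1 (trains.take (w-1)) ≠ [] :=
            fun h => ((posL_nil_iff 2 (trains.take (w-1)) 1).mp h) h2m
          rw [← hfil] at hnn
          obtain ⟨a, ha⟩ := List.exists_mem_of_ne_nil _ hnn
          obtain ⟨ha1, ha2⟩ := List.mem_filter.mp ha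
          exact ⟨a, ha1, by simp at ha2; omega⟩
        cases hh : (posL 2 1 trains).head? with
        | none => exact absurd (List.head?_eq_none_iff.mp hh) hne
        | some f =>
          obtain ⟨a, hamem, hale⟩ := hsmall
          have hfle : f ≤ (w : Int) - 1 :=
            le_trans (head_min (posL 2 1 trains) (posL_sorted 2 trains 1) f hh a hamem) hale
          rw [htE', List.headD_eq_head?]
          cases hgh : ((posL 2 1 trains).filter (fun a => decide ((w : Int) ≤ a))).head? with
          | none =>
            have hf1 : 1 ≤ f := by
              have := posL_mem 2 trains 1 f (List.mem_of_mem_head? hh)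
              omega
            rw [hoE]
            show branchA (-1) ((none : Option Int).getD (-1)) p ≠ f - p
            have hval : branchA (-1) ((none : Option Int).getD (-1)) p = -1 := by
              simp [branchA]
            rw [hval]
            omega
          | some g =>
            have hgw : (w : Int) ≤ g := by
              have := List.mem_filter.mp (List.mem_of_mem_head? hgh)
              simpa using this.2
            have hgne : (g == (-1 : Int)) = false := by simp; omega
            rw [hoE]
            show branchA (-1) ((some g).getD (-1)) p ≠ f - p
            have hval : branchA (-1) ((some g).getD (-1)) p = g - p := by
              simp [branchA, hgne]
            rw [hval]
            omega

-- ===== VERDICT (by name: the statement is the Claim_ definition above) =====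
theorem shroute_spec : Claim_unchanged_shroute := by
  intro trains peeps _ hPre
  unfold Spec_shroute
  intro hD
  rw [shroute_eq_map, shroute_alt_eq_map]
  apply List.map_congr_left
  intro p hp
  exact q_eq trains p (hPre p hp) (fun hc => hD ⟨p, hp, hc⟩)

theorem shroute_changed : Claim_changed_shroute := by unfold Claim_changed_shroute; decide

theorem shroute_tight : Claim_exact_shroute := by
  intro trains peeps _ _ hD
  obtain ⟨p, hp, hc⟩ := hD
  rw [shroute_eq_map, shroute_alt_eq_map]
  intro heq
  rw [List.map_inj_left] at heq
  exact q_ne trains p hc (heq p hp)
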